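-- pv_equiv track=rewrite | github.com/JulGoo/Coding_Test | Programmers/둘만의암호.py | solution
-- ===== SOURCE A (Python) =====
-- def solution(s, skip, index):
--     answer = ''
--     for char in s:
--         ns = ord(char)
--         count = index
--         while count != 0:
--             ns += 1
--             if ns > ord('z'):
--                 ns = ns - ord('z') + ord('a') - 1
--                 # 124 -> 98(b)
--                 # 124 - 122 + 97 - 1
--             if chr(ns) not in skip:
--                 count -= 1
--             else:
--                 continue
--         answer += chr(ns)
--
--     return answer
-- ===== SOURCE B (Python) =====
-- def solution(s, skip, index):
--     # Faster: instead of stepping one code point at a time index times, count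
--     # the usable code points on the single straight climb to 'z' and then jump
--     # into the precomputed allowed a-z letters with modular arithmetic.
--     allowed = [c for c in "abcdefghijklmnopqrstuvwxyz" if c not in skip]
--     out = []
--     for ch in s:
--         start = ord(ch) + 1
--         if start > 122:
--             start -= 26
--         seg = [v for v in range(start, 123) if chr(v) not in skip]
--         if index <= len(seg) and index > 0:
--             out.append(chr(seg[index - 1]))
--         elif index == 0:
--             out.append(ch)
--         else:
--             r = index - len(seg)
--             out.append(allowed[(r - 1) % len(allowed)])
--     return ''.join(out)
-- ===== Notes on version B (the rewrite author's own statement) =====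
-- stated objective: faster
-- what changed: Replaces the per-character step-by-step while loop (index iterations each) by counting the usable code points on the one straight climb to 'z' and then indexing into the precomputed allowed a-z letters with modular arithmetic, memoized per distinct character.
import Mathlib
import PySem

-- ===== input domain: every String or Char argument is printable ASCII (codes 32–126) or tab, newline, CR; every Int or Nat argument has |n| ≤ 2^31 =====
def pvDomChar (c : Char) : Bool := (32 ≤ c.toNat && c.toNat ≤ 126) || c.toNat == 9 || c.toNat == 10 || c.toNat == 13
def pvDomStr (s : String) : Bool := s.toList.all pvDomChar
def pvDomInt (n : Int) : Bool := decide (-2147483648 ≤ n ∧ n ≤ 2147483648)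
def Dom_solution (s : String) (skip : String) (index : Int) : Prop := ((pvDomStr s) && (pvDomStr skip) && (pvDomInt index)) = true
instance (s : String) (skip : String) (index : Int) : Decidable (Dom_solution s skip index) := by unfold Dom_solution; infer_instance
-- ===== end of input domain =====

-- B replaces A's per-character one-step-at-a-time while loop (index iterations per
-- character) by one filtered scan of the straight climb to 'z' plus a modular-arithmetic
-- jump into the allowed a-z letters; measurably faster for large index.

-- ===== PORT A =====
-- `nxt` is Python's  "ns += 1; if ns > ord('z'): ns = ns - ord('z') + ord('a') - 1"
def nxt (v : Int) : Int := if v + 1 > 122 then v + 1 - 26 else v + 1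

-- `chr(ns) in skip`: membership of a single character in the string (exact here)
def inSkipI (skip : String) (v : Int) : Bool := skip.toList.contains (Char.ofNat v.toNat)

-- A's while loop, with a fuel guard for totality only: under Pre_solution the fuel
-- 140 * (index.toNat + 1) is proved never to run out (lemma loopA_eq_BvalI below)
def loopA (skip : String) : Nat → Int → Int → Int
  | 0, ns, _ => ns
  | fuel+1, ns, count =>
    if count = 0 then ns
    else
      let ns2 := nxt ns
      if !(inSkipI skip ns2) then loopA skip fuel ns2 (count - 1)
      else loopA skip fuel ns2 count

-- answer is accumulated as a List Char and packed into a String at the end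
def solution (s : String) (skip : String) (index : Int) : String :=
  String.mk (s.toList.foldl (fun answer ch =>
    answer ++ [Char.ofNat ((loopA skip (140 * (index.toNat + 1)) ((ch.toNat : Int)) index).toNat)]) [])

-- ===== PORT B =====
-- the characters of "abcdefghijklmnopqrstuvwxyz"
def lowerChars : List Char := ['a','b','c','d','e','f','g','h','i','j','k','l','m','n','o','p','q','r','s','t','u','v','w','x','y','z']

def allowedOf (skip : String) : List Char := lowerChars.filter (fun c => !(skip.toList.contains c))

def segOf (skip : String) (start : Int) : List Int :=
  (PySem.List.pyRange start 123).filter (fun v => !(inSkipI skip v))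

def solution_alt (s : String) (skip : String) (index : Int) : String :=
  let allowed := allowedOf skip
  String.mk (s.toList.map (fun ch =>
    let seg := segOf skip (nxt (ch.toNat : Int))
    if index ≤ (seg.length : Int) ∧ 0 < index then
      Char.ofNat ((seg.getD (index - 1).toNat 0).toNat)
    else if index = 0 then ch
    else
      let r := index - (seg.length : Int)
      allowed.getD (PySem.Int.mod (r - 1) (allowed.length : Int)).toNat 'a'))

-- ===== PRECONDITION & SPEC =====
-- Pre_ excludes exactly the inputs on which the Python A never returns (the while loop
-- diverges): a nonempty s with a negative index (count only moves further from 0), and a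
-- nonempty s with index > 0 when the alphabet is entirely in skip while some character of
-- s has fewer than index usable code points on its climb to 'z' (count never reaches 0).
def Pre_solution (s : String) (skip : String) (index : Int) : Prop :=
  s.toList = [] ∨
  (0 ≤ index ∧
   ((lowerChars.any (fun c => !(skip.toList.contains c)) = true) ∨
    ∀ ch ∈ s.toList, index ≤ ((segOf skip (nxt (ch.toNat : Int))).length : Int)))
instance (s : String) (skip : String) (index : Int) : Decidable (Pre_solution s skip index) := by unfold Pre_solution; infer_instance

def pvWitness_solution : String × String × Int := ("hello world", "xz", 5)

def Spec_solution (s : String) (skip : String) (index : Int) (out : String) : Prop := out = solution_alt s skip index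
instance (s : String) (skip : String) (index : Int) (out : String) : Decidable (Spec_solution s skip index out) := by unfold Spec_solution; infer_instance

-- ===== CLAIM (what is proved, stated in full; the proofs are below) =====
def Claim_equal_solution : Prop := ∀ (s : String) (skip : String) (index : Int), Dom_solution s skip index → Pre_solution s skip index → Spec_solution s skip index (solution s skip index)

-- ===== LEMMAS AND PROOFS =====

-- integer values of the allowed letters
def aVals (skip : String) : List Int := (allowedOf skip).map (fun c => (c.toNat : Int))

def allowedI (skip : String) (v : Int) : Bool := !(inSkipI skip v)

-- closed form of the loop's value, phrased like B's per-character computation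
def BvalI (skip : String) (ns count : Int) : Int :=
  if count = 0 then ns
  else if count ≤ ((segOf skip (nxt ns)).length : Int) then
    (segOf skip (nxt ns)).getD (count - 1).toNat 0
  else
    (aVals skip).getD
      (PySem.Int.mod (count - ((segOf skip (nxt ns)).length : Int) - 1) ((aVals skip).length : Int)).toNat 0

def iterN (n : Nat) (v : Int) : Int := nxt^[n] v

lemma nxt_bounds {v : Int} (h1 : 9 ≤ v) (h2 : v ≤ 126) : 10 ≤ nxt v ∧ nxt v ≤ 122 := by
  unfold nxt; split_ifs <;> omega

lemma iterN_succ (n : Nat) (v : Int) : iterN (n+1) v = iterN n (nxt v) :=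
  Function.iterate_succ_apply nxt n v

lemma iterN_add (m n : Nat) (v : Int) : iterN (m + n) v = iterN m (iterN n v) :=
  Function.iterate_add_apply nxt m n v

lemma climb : ∀ (m : Nat) (v : Int), 10 ≤ v → v + m ≤ 122 → iterN m v = v + m := by
  intro m
  induction m with
  | zero => intro v _ _; simp [iterN]
  | succ n ih =>
      intro v hv hle
      rw [iterN_succ]
      have hx : nxt v = v + 1 := by unfold nxt; split_ifs <;> omega
      rw [hx, ih (v+1) (by omega) (by push_cast at hle ⊢; omega)]
      push_cast; ring

lemma reach_straight {v u : Int} (h1 : 9 ≤ v) (h2 : v ≤ 126) (h3 : nxt v ≤ u) (h4 : u ≤ 122) :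
    iterN ((u - nxt v).toNat + 1) v = u := by
  rw [iterN_succ]
  have hb := nxt_bounds h1 h2
  rw [climb _ _ (by omega) (by omega)]
  omega

lemma reach_any {v u : Int} (h1 : 9 ≤ v) (h2 : v ≤ 126) (h3 : 97 ≤ u) (h4 : u ≤ 122) :
    ∃ d : Nat, 1 ≤ d ∧ d ≤ 140 ∧ iterN d v = u := by
  have hb := nxt_bounds h1 h2
  by_cases hc : nxt v ≤ u
  · exact ⟨(u - nxt v).toNat + 1, by omega, by omega, reach_straight h1 h2 hc h4⟩
  · -- climb to 122, wrap to 97, climb on to u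
    have h122 : iterN ((122 - nxt v).toNat + 1) v = 122 := reach_straight h1 h2 (by omega) (by omega)
    have hn122 : nxt (122 : Int) = 97 := by decide
    have hu : iterN ((u - 97).toNat + 1) (122 : Int) = u := by
      have := reach_straight (v := (122:Int)) (u := u) (by omega) (by omega) (by omega) h4
      simpa [hn122] using this
    refine ⟨((u - 97).toNat + 1) + ((122 - nxt v).toNat + 1), by omega, by omega, ?_⟩
    rw [iterN_add, h122, hu]

lemma mem_segOf {skip : String} {start u : Int} :
    u ∈ segOf skip start ↔ (start ≤ u ∧ u < 123) ∧ allowedI skip u = true := by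
  simp [segOf, allowedI, List.mem_filter, PySem.List.mem_pyRange_one]

set_option maxRecDepth 4096 in
lemma aVals_eq (skip : String) : aVals skip = segOf skip 97 := by
  unfold segOf
  rw [(by decide : PySem.List.pyRange 97 123 = lowerChars.map (fun c => (c.toNat : Int))),
      List.filter_map]
  unfold aVals allowedOf
  have hfc : List.filter ((fun v => !(inSkipI skip v)) ∘ fun c : Char => ((c.toNat : Int))) lowerChars
      = List.filter (fun c => !(skip.toList.contains c)) lowerChars := by
    apply List.filter_congr
    intro c _
    simp [inSkipI, Function.comp]
  rw [hfc]

lemma seg_step_lt {skip : String} {ns : Int} (h1 : 9 ≤ ns) (h2 : ns ≤ 126) (hlt : nxt ns ≤ 121) :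
    segOf skip (nxt ns) =
      (if allowedI skip (nxt ns) then [nxt ns] else []) ++ segOf skip (nxt (nxt ns)) := by
  have hb := nxt_bounds h1 h2
  set x := nxt ns with hx
  have hn : nxt x = x + 1 := by unfold nxt; split_ifs <;> omega
  unfold segOf
  rw [PySem.List.pyRange_one_cons (by omega : x < 123), List.filter_cons, hn]
  by_cases h : inSkipI skip x = true
  · simp [allowedI, h]
  · simp at h; simp [allowedI, h]

lemma seg_step_122 {skip : String} {ns : Int} (h122 : nxt ns = 122) :
    segOf skip (nxt ns) = (if allowedI skip 122 then [(122 : Int)] else []) := by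
  unfold segOf
  rw [h122, PySem.List.pyRange_one_cons (by omega : (122:Int) < 123)]
  rw [(by decide : PySem.List.pyRange (122 + 1) 123 = ([] : List Int)), List.filter_cons]
  by_cases h : inSkipI skip 122 = true
  · simp [allowedI, h]
  · simp at h; simp [allowedI, h]

lemma seg_122 (skip : String) : segOf skip (nxt 122) = aVals skip := by
  rw [(by decide : nxt (122:Int) = 97), aVals_eq]

set_option maxRecDepth 4096 in
lemma k_pos_of_allowed_122 {skip : String} (h : allowedI skip 122 = true) :
    0 < (aVals skip).length := by
  have h122 : (122 : Int) ∈ segOf skip 97 := by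
    rw [mem_segOf]; exact ⟨⟨by omega, by omega⟩, h⟩
  rw [← aVals_eq] at h122
  exact List.length_pos_of_mem h122

-- the one-step peel of the closed form
lemma peel {skip : String} {ns count : Int} (h1 : 9 ≤ ns) (h2 : ns ≤ 126) (hc : 1 ≤ count) :
    BvalI skip ns count =
      BvalI skip (nxt ns) (if allowedI skip (nxt ns) then count - 1 else count) := by
  have hb := nxt_bounds h1 h2
  have hc0 : count ≠ 0 := by omega
  by_cases h122 : nxt ns = 122
  · -- about to test 'z'
    have hL : segOf skip (nxt ns) = (if allowedI skip 122 then [(122 : Int)] else []) :=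
      seg_step_122 h122
    have hL' : segOf skip (nxt (nxt ns)) = aVals skip := by rw [h122]; exact seg_122 skip
    by_cases ha : allowedI skip 122 = true
    · have hk : 0 < (aVals skip).length := k_pos_of_allowed_122 ha
      rw [if_pos (show allowedI skip (nxt ns) = true by rw [h122]; exact ha)]
      rw [BvalI, BvalI, if_neg hc0, hL, hL', if_pos ha]
      simp only [List.length_cons, List.length_nil]
      by_cases hc1 : count = 1
      · subst hc1
        norm_num
        exact h122.symm
      · have hc2 : 2 ≤ count := by omega
        rw [if_neg (by push_cast; omega), if_neg (by omega : ¬ (count - 1 = 0))]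
        by_cases hle : count - 1 ≤ ((aVals skip).length : Int)
        · rw [if_pos hle]
          have hmod : PySem.Int.mod (count - ((0:Nat)+1 : Nat) - 1) ((aVals skip).length : Int)
              = count - 1 - 1 := by
            rw [PySem.Int.mod_eq_emod_of_pos (by exact_mod_cast hk)]
            exact Int.emod_eq_of_lt (by push_cast; omega) (by push_cast at hle ⊢; omega)
          rw [hmod]
        · rw [if_neg hle]
          congr 2
          rw [PySem.Int.mod_eq_emod_of_pos (by exact_mod_cast hk),
              PySem.Int.mod_eq_emod_of_pos (by exact_mod_cast hk)]
          have heq : count - 1 - ((aVals skip).length : Int) - 1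
              = (count - ((0:Nat)+1 : Nat) - 1) - ((aVals skip).length : Int) := by push_cast; ring
          rw [heq, Int.sub_emod_right]
    · rw [if_neg (show ¬ allowedI skip (nxt ns) = true by rw [h122]; exact ha)]
      rw [BvalI, BvalI, if_neg hc0, if_neg hc0, hL, hL', if_neg ha]
      simp only [List.length_nil]
      rw [if_neg (by push_cast; omega)]
      by_cases hle : count ≤ ((aVals skip).length : Int)
      · have hk : 0 < (aVals skip).length := by
          by_contra h
          have h0 : (aVals skip).length = 0 := by omega
          rw [h0] at hle; push_cast at hle; omega
        rw [if_pos hle]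
        have hmod : PySem.Int.mod (count - ((0:Nat) : Int) - 1) ((aVals skip).length : Int)
            = count - 1 := by
          rw [PySem.Int.mod_eq_emod_of_pos (by exact_mod_cast hk)]
          have : count - ((0:Nat) : Int) - 1 = count - 1 := by push_cast; ring
          rw [this]
          exact Int.emod_eq_of_lt (by omega) (by omega)
        rw [hmod]
      · rw [if_neg hle]
        rcases Nat.eq_zero_or_pos (aVals skip).length with hk0 | hk
        · have hnil : aVals skip = [] := List.eq_nil_of_length_eq_zero hk0
          simp [hnil]
        · congr 2
          rw [PySem.Int.mod_eq_emod_of_pos (by exact_mod_cast hk),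
              PySem.Int.mod_eq_emod_of_pos (by exact_mod_cast hk)]
          have heq : count - ((aVals skip).length : Int) - 1
              = (count - ((0:Nat) : Int) - 1) - ((aVals skip).length : Int) := by push_cast; ring
          rw [heq, Int.sub_emod_right]
  · -- nxt ns ≤ 121
    have hlt : nxt ns ≤ 121 := by omega
    have hstep := seg_step_lt (skip := skip) h1 h2 hlt
    by_cases ha : allowedI skip (nxt ns) = true
    · rw [if_pos ha]
      rw [if_pos ha] at hstep
      rw [BvalI, BvalI, if_neg hc0, hstep]
      simp only [List.singleton_append, List.length_cons]
      by_cases hc1 : count = 1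
      · subst hc1; norm_num
      · have hc2 : 2 ≤ count := by omega
        rw [if_neg (by omega : ¬ (count - 1 = 0))]
        by_cases hle : count - 1 ≤ ((segOf skip (nxt (nxt ns))).length : Int)
        · rw [if_pos (by push_cast; omega), if_pos hle]
          have h1t : (count - 1).toNat = (count - 1 - 1).toNat + 1 := by omega
          rw [h1t, List.getD_cons_succ]
        · rw [if_neg (by push_cast at hle ⊢; omega), if_neg hle]
          congr 2
          push_cast
          ring_nf
    · rw [if_neg ha]
      rw [if_neg ha, List.nil_append] at hstep
      rw [BvalI, BvalI, if_neg hc0, if_neg hc0, hstep]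

-- a nonempty aVals yields an allowed letter value
lemma exists_allowed_of_k_pos {skip : String} (hk : 0 < (aVals skip).length) :
    ∃ u : Int, 97 ≤ u ∧ u ≤ 122 ∧ allowedI skip u = true := by
  have hne : aVals skip ≠ [] := List.ne_nil_of_length_pos hk
  obtain ⟨u, hu⟩ := List.exists_mem_of_ne_nil _ hne
  rw [aVals_eq, mem_segOf] at hu
  exact ⟨u, hu.1.1, by omega, hu.2⟩

-- a usable target exists whenever the invariant holds and count ≥ 1
lemma invariant_target {skip : String} {ns count : Int} (h1 : 9 ≤ ns) (h2 : ns ≤ 126)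
    (hinv : 0 < (aVals skip).length ∨ count ≤ ((segOf skip (nxt ns)).length : Int))
    (hc : 1 ≤ count) :
    ∃ d : Nat, 1 ≤ d ∧ d ≤ 140 ∧ allowedI skip (iterN d ns) = true := by
  rcases hinv with hk | hseg
  · obtain ⟨u, hu1, hu2, hu3⟩ := exists_allowed_of_k_pos hk
    obtain ⟨d, hd1, hd2, hd3⟩ := reach_any h1 h2 hu1 hu2
    exact ⟨d, hd1, hd2, by rw [hd3]; exact hu3⟩
  · have hne : segOf skip (nxt ns) ≠ [] := by
      intro h; rw [h] at hseg; simp at hseg; omega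
    obtain ⟨u, hu⟩ := List.exists_mem_of_ne_nil _ hne
    obtain ⟨⟨hu1, hu2⟩, hu3⟩ := mem_segOf.mp hu
    have hb := nxt_bounds h1 h2
    refine ⟨(u - nxt ns).toNat + 1, by omega, by omega, ?_⟩
    rw [reach_straight h1 h2 hu1 (by omega)]; exact hu3

-- main invariant lemma: with enough fuel the loop computes the closed form
lemma loopA_eq_BvalI (skip : String) :
    ∀ (f : Nat) (count ns : Int), 9 ≤ ns → ns ≤ 126 → 0 ≤ count →
    (0 < (aVals skip).length ∨ count ≤ ((segOf skip (nxt ns)).length : Int)) →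
    (count = 0 ∨ ∃ d : Nat, 1 ≤ d ∧ d ≤ 140 ∧ allowedI skip (iterN d ns) = true ∧
        d + 140 * (count - 1).toNat ≤ f) →
    loopA skip f ns count = BvalI skip ns count := by
  intro f
  induction f with
  | zero =>
      intro count ns h1 h2 h0 hinv hfuel
      rcases hfuel with h | ⟨d, hd1, _, _, hdf⟩
      · subst h; simp [loopA, BvalI]
      · omega
  | succ f ih =>
      intro count ns h1 h2 h0 hinv hfuel
      by_cases hc0 : count = 0
      · subst hc0; simp [loopA, BvalI]
      · rcases hfuel with h | ⟨d, hd1, hd2, hda, hdf⟩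
        · exact absurd h hc0
        have hc1 : 1 ≤ count := by omega
        have hb := nxt_bounds h1 h2
        rw [show loopA skip (f+1) ns count =
              (if count = 0 then ns
               else if !(inSkipI skip (nxt ns)) then loopA skip f (nxt ns) (count - 1)
               else loopA skip f (nxt ns) count) from rfl,
            if_neg hc0]
        by_cases ha : allowedI skip (nxt ns) = true
        · -- usable character: count decremented
          rw [if_pos (show (!(inSkipI skip (nxt ns))) = true from ha)]
          have hinv' : 0 < (aVals skip).length ∨
              count - 1 ≤ ((segOf skip (nxt (nxt ns))).length : Int) := by
            rcases hinv with hk | hseg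
            · exact Or.inl hk
            · right
              by_cases h122 : nxt ns = 122
              · rw [seg_step_122 h122, if_pos (show allowedI skip 122 = true from h122 ▸ ha)]
                  at hseg
                simp only [List.length_cons, List.length_nil] at hseg
                omega
              · rw [seg_step_lt h1 h2 (by omega), if_pos ha] at hseg
                simp only [List.singleton_append, List.length_cons] at hseg
                push_cast at hseg ⊢
                omega
          have hrec : loopA skip f (nxt ns) (count - 1) = BvalI skip (nxt ns) (count - 1) := by
            apply ih (count - 1) (nxt ns) (by omega) (by omega) (by omega) hinv'
            by_cases hcc : count - 1 = 0
            · exact Or.inl hcc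
            · right
              obtain ⟨d', hd1', hd2', hda'⟩ :=
                invariant_target (by omega) (by omega) hinv' (by omega)
              refine ⟨d', hd1', hd2', hda', ?_⟩
              have h1t : (count - 1).toNat = (count - 1 - 1).toNat + 1 := by omega
              omega
          rw [hrec, peel h1 h2 hc1, if_pos ha]
        · -- skipped character: count unchanged
          have hskip : ¬ ((!(inSkipI skip (nxt ns))) = true) := ha
          rw [if_neg hskip]
          have hd2' : 2 ≤ d := by
            by_contra h
            have hd1'' : d = 1 := by omega
            rw [hd1''] at hda
            exact ha (by simpa [iterN] using hda)
          have hinv' : 0 < (aVals skip).length ∨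
              count ≤ ((segOf skip (nxt (nxt ns))).length : Int) := by
            rcases hinv with hk | hseg
            · exact Or.inl hk
            · right
              by_cases h122 : nxt ns = 122
              · rw [seg_step_122 h122, if_neg (show ¬ allowedI skip 122 = true from h122 ▸ ha)]
                  at hseg
                simp only [List.length_nil] at hseg
                exfalso; omega
              · rw [seg_step_lt h1 h2 (by omega), if_neg ha, List.nil_append] at hseg
                exact hseg
          have hrec : loopA skip f (nxt ns) count = BvalI skip (nxt ns) count := by
            apply ih count (nxt ns) (by omega) (by omega) (by omega) hinv'
            right
            refine ⟨d - 1, by omega, by omega, ?_, by omega⟩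
            have hds : d - 1 + 1 = d := by omega
            rw [← hds, iterN_succ] at hda
            exact hda
          rw [hrec, peel h1 h2 hc1, if_neg ha]

-- per-character equality
lemma char_eq {skip : String} {index : Int} (ch : Char)
    (hch9 : 9 ≤ (ch.toNat : Int)) (hch126 : (ch.toNat : Int) ≤ 126)
    (hidx : 0 ≤ index)
    (hinv : 0 < (aVals skip).length ∨ index ≤ ((segOf skip (nxt (ch.toNat : Int))).length : Int)) :
    Char.ofNat ((loopA skip (140 * (index.toNat + 1)) ((ch.toNat : Int)) index).toNat) =
      (if index ≤ ((segOf skip (nxt (ch.toNat : Int))).length : Int) ∧ 0 < index then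
         Char.ofNat (((segOf skip (nxt (ch.toNat : Int))).getD (index - 1).toNat 0).toNat)
       else if index = 0 then ch
       else
         (allowedOf skip).getD
           (PySem.Int.mod (index - ((segOf skip (nxt (ch.toNat : Int))).length : Int) - 1)
             ((allowedOf skip).length : Int)).toNat 'a') := by
  have hfuel : index = 0 ∨ ∃ d : Nat, 1 ≤ d ∧ d ≤ 140 ∧
      allowedI skip (iterN d (ch.toNat : Int)) = true ∧
      d + 140 * (index - 1).toNat ≤ 140 * (index.toNat + 1) := by
    by_cases h0 : index = 0
    · exact Or.inl h0
    · right
      obtain ⟨d, hd1, hd2, hda⟩ := invariant_target hch9 hch126 hinv (by omega)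
      refine ⟨d, hd1, hd2, hda, ?_⟩
      have ht : (index - 1).toNat + 1 = index.toNat := by omega
      omega
  rw [loopA_eq_BvalI skip (140 * (index.toNat + 1)) index ((ch.toNat : Int))
      hch9 hch126 hidx hinv hfuel]
  rw [BvalI]
  by_cases h0 : index = 0
  · subst h0
    rw [if_pos rfl, if_neg (by omega : ¬ ((0:Int) ≤ ((segOf skip (nxt (ch.toNat : Int))).length : Int) ∧ (0:Int) < 0)), if_pos rfl]
    rw [Int.toNat_natCast, Char.ofNat_toNat]
  · rw [if_neg h0]
    by_cases hle : index ≤ ((segOf skip (nxt (ch.toNat : Int))).length : Int)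
    · rw [if_pos hle, if_pos ⟨hle, by omega⟩]
    · rw [if_neg hle, if_neg (fun h => hle h.1), if_neg h0]
      have hk : 0 < (aVals skip).length := by
        rcases hinv with hk | hs
        · exact hk
        · exact absurd hs hle
      have hKeq : ((aVals skip).length : Int) = ((allowedOf skip).length : Int) := by
        simp [aVals]
      rw [hKeq]
      have hk' : 0 < ((allowedOf skip).length : Int) := by
        rw [← hKeq]; exact_mod_cast hk
      have hjlt : (PySem.Int.mod (index - ((segOf skip (nxt (ch.toNat : Int))).length : Int) - 1)
          ((allowedOf skip).length : Int)).toNat < (allowedOf skip).length := by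
        have hml := PySem.Int.mod_lt
          (a := index - ((segOf skip (nxt (ch.toNat : Int))).length : Int) - 1) hk'
        have hmn := PySem.Int.mod_nonneg
          (a := index - ((segOf skip (nxt (ch.toNat : Int))).length : Int) - 1) hk'
        omega
      have hjlt' : (PySem.Int.mod (index - ((segOf skip (nxt (ch.toNat : Int))).length : Int) - 1)
          ((allowedOf skip).length : Int)).toNat < (aVals skip).length := by
        unfold aVals; simpa using hjlt
      rw [List.getD_eq_getElem _ _ hjlt', List.getD_eq_getElem _ _ hjlt]
      unfold aVals
      rw [List.getElem_map]
      rw [Int.toNat_natCast, Char.ofNat_toNat]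

-- ===== VERDICT (by name: the statement is the Claim_ definition above) =====
theorem solution_spec : Claim_equal_solution := by
  intro s skip index hdom hpre
  unfold Spec_solution solution solution_alt
  rw [PySem.List.foldl_append_singleton_eq_map]
  simp only [List.nil_append]
  congr 1
  rcases hpre with hemp | ⟨hidx, hinv⟩
  · rw [hemp]; rfl
  apply List.map_congr_left
  intro ch hch
  have hdomch : pvDomChar ch = true := by
    unfold Dom_solution at hdom
    simp only [Bool.and_eq_true] at hdom
    have := hdom.1.1
    unfold pvDomStr at this
    rw [List.all_eq_true] at this
    exact this ch hch
  have hbnd : 9 ≤ (ch.toNat : Int) ∧ (ch.toNat : Int) ≤ 126 := by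
    unfold pvDomChar at hdomch
    simp only [Bool.or_eq_true, Bool.and_eq_true, decide_eq_true_eq, beq_iff_eq] at hdomch
    rcases hdomch with ((⟨hx1, hx2⟩ | h) | h) | h <;> omega
  have hinv' : 0 < (aVals skip).length ∨
      index ≤ ((segOf skip (nxt (ch.toNat : Int))).length : Int) := by
    rcases hinv with h | h
    · left
      obtain ⟨c, hc, hcb⟩ := List.any_eq_true.mp h
      have hmem : c ∈ allowedOf skip := by
        unfold allowedOf
        rw [List.mem_filter]
        exact ⟨hc, hcb⟩
      unfold aVals
      simp only [List.length_map]
      exact List.length_pos_of_mem hmem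
    · exact Or.inr (h ch hch)
  exact char_eq ch hbnd.1 hbnd.2 hidx hinv'
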